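-- pv_equiv track=rewrite | github.com/Leewuc/codetree-TILs | 240603/데이터센터의 온도 조정 2/adjusting-the-temperature-of-the-data-center-2.py | max_workload
-- ===== SOURCE A (Python) =====
-- def max_workload(N, C, G, H, temperature_ranges):
--     # 가능한 모든 온도를 탐색하기 위해 온도를 0에서 1000까지 순회합니다.
--     max_workload = 0
--
--     for temperature in range(1001):
--         current_workload = 0
--
--         for Ta, Tb in temperature_ranges:
--             if temperature < Ta:
--                 current_workload += C
--             elif Ta <= temperature <= Tb:
--                 current_workload += G
--             else:
--                 current_workload += H
--
--         # 최대 작업량을 업데이트합니다.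
--         if current_workload > max_workload:
--             max_workload = current_workload
--
--     return max_workload
-- ===== SOURCE B (Python) =====
-- def max_workload(N, C, G, H, temperature_ranges):
--     # Difference array over temperatures 0..1000: O(N + 1001) instead of O(1001*N).
--     T = 1000
--     base = 0
--     diff = [0] * (T + 1)
--     for Ta, Tb in temperature_ranges:
--         base += C if 0 < Ta else (G if 0 <= Tb else H)
--         if Ta <= Tb:
--             if 1 <= Ta <= T:
--                 diff[Ta] += G - C
--             if 1 <= Tb + 1 <= T:
--                 diff[Tb + 1] += H - G
--         else:
--             if 1 <= Ta <= T:
--                 diff[Ta] += H - C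
--     best = max(0, base)
--     cur = base
--     for t in range(1, T + 1):
--         cur += diff[t]
--         if cur > best:
--             best = cur
--     return best
-- ===== Notes on version B (the rewrite author's own statement) =====
-- stated objective: faster
-- what changed: Replaces the 1001xN double scan with a difference array: one pass over the ranges records per-range jump contributions (clamped to 1..1000) plus the value at temperature 0, then a single prefix-sum sweep over 0..1000 takes the running maximum.
import Mathlib
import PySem

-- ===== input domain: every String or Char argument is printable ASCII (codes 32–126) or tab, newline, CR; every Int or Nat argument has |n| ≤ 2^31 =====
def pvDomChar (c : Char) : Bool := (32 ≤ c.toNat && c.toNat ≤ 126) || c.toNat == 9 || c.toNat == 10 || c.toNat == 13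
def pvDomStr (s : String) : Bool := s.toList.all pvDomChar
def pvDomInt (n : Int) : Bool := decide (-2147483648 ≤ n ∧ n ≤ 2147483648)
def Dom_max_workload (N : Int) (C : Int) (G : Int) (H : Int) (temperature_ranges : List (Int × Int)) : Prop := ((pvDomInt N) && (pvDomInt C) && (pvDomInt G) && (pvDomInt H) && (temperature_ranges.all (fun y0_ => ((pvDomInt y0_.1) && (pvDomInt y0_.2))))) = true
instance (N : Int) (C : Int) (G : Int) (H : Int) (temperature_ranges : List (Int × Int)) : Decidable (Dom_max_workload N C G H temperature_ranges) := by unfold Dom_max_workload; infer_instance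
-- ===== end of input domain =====

-- B replaces A's 1001×N double scan by a difference array plus one prefix-sum sweep (asymptotically faster).


-- ===== PORT A =====
def max_workload (N : Int) (C : Int) (G : Int) (H : Int) (temperature_ranges : List (Int × Int)) : Int :=
  (PySem.List.pyRange 0 1001 1).foldl (fun mw temperature =>
    let cw := temperature_ranges.foldl (fun acc r =>
      if temperature < r.1 then acc + C
      else if r.1 ≤ temperature ∧ temperature ≤ r.2 then acc + G
      else acc + H) 0
    if cw > mw then cw else mw) 0

-- ===== PORT B =====
-- diff[i] += v  (i a Python int index, in range by the guards in bStep)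
def bAddAt (l : List Int) (i : Int) (v : Int) : List Int :=
  PySem.List.pySetD l i (PySem.List.pyGetD l i 0 + v)

-- one iteration of B's first loop: accumulate base (value at temperature 0) and the jump contributions
def bStep (C G H : Int) (st : Int × List Int) (r : Int × Int) : Int × List Int :=
  let base := st.1 + (if 0 < r.1 then C else if 0 ≤ r.2 then G else H)
  let diff := st.2
  let diff :=
    if r.1 ≤ r.2 then
      let diff := if 1 ≤ r.1 ∧ r.1 ≤ 1000 then bAddAt diff r.1 (G - C) else diff
      if 1 ≤ r.2 + 1 ∧ r.2 + 1 ≤ 1000 then bAddAt diff (r.2 + 1) (H - G) else diff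
    else
      if 1 ≤ r.1 ∧ r.1 ≤ 1000 then bAddAt diff r.1 (H - C) else diff
  (base, diff)

def max_workload_alt (N : Int) (C : Int) (G : Int) (H : Int) (temperature_ranges : List (Int × Int)) : Int :=
  let st := temperature_ranges.foldl (bStep C G H) (0, List.replicate 1001 0)
  let best := max 0 st.1
  ((PySem.List.pyRange 1 1001 1).foldl (fun (p : Int × Int) t =>
      let cur := p.1 + PySem.List.pyGetD st.2 t 0
      (cur, if cur > p.2 then cur else p.2)) (st.1, best)).2

-- ===== PRECONDITION & SPEC =====
def Spec_max_workload (N : Int) (C : Int) (G : Int) (H : Int) (temperature_ranges : List (Int × Int)) (out : Int) : Prop := out = max_workload_alt N C G H temperature_ranges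
instance (N : Int) (C : Int) (G : Int) (H : Int) (temperature_ranges : List (Int × Int)) (out : Int) : Decidable (Spec_max_workload N C G H temperature_ranges out) := by unfold Spec_max_workload; infer_instance

-- ===== CLAIM (what is proved, stated in full; the proofs are below) =====
def Claim_equal_max_workload : Prop := ∀ (N : Int) (C : Int) (G : Int) (H : Int) (temperature_ranges : List (Int × Int)), Dom_max_workload N C G H temperature_ranges → Spec_max_workload N C G H temperature_ranges (max_workload N C G H temperature_ranges)

-- ===== LEMMAS AND PROOFS =====

-- per-range workload at temperature t
def gv (C G H : Int) (r : Int × Int) (t : Int) : Int :=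
  if t < r.1 then C else if t ≤ r.2 then G else H

-- total workload at temperature t
def Sv (C G H : Int) (tr : List (Int × Int)) (t : Int) : Int :=
  (tr.map (fun r => gv C G H r t)).sum

lemma inner_eq_S (C G H t : Int) (tr : List (Int × Int)) :
    tr.foldl (fun acc r =>
      if t < r.1 then acc + C
      else if r.1 ≤ t ∧ t ≤ r.2 then acc + G
      else acc + H) 0 = Sv C G H tr t := by
  have h : ∀ (acc : Int) (r : Int × Int), (if t < r.1 then acc + C
      else if r.1 ≤ t ∧ t ≤ r.2 then acc + G
      else acc + H) = acc + gv C G H r t := by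
    intro acc r
    unfold gv
    split_ifs with h1 h2 h3 h4 <;> first | rfl | omega
  calc tr.foldl (fun acc r =>
      if t < r.1 then acc + C
      else if r.1 ≤ t ∧ t ≤ r.2 then acc + G
      else acc + H) 0
      = tr.foldl (fun acc r => acc + gv C G H r t) 0 :=
        PySem.List.foldl_congr_mem tr _ _ 0 (fun acc x _ => h acc x)
    _ = Sv C G H tr t := by
        rw [PySem.List.foldl_add tr _ 0]; simp [Sv]

lemma length_bAddAt (l : List Int) (i v : Int) : (bAddAt l i v).length = l.length := by
  simp [bAddAt, PySem.List.length_pySetD]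

lemma pyGetD_bAddAt (l : List Int) (i v k : Int) (hi0 : 0 ≤ i) (hil : i < l.length)
    (hk0 : 0 ≤ k) (hkl : k < l.length) :
    PySem.List.pyGetD (bAddAt l i v) k 0 = PySem.List.pyGetD l k 0 + if k = i then v else 0 := by
  unfold bAddAt
  rw [PySem.List.pySetD_of_nonneg _ _ hi0]
  rw [PySem.List.pyGetD_eq_getElem _ _ hk0 (by simpa using hkl),
      PySem.List.pyGetD_eq_getElem _ _ hk0 hkl,
      PySem.List.pyGetD_eq_getElem _ _ hi0 hil]
  by_cases hki : k = i
  · subst hki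
    rw [if_pos rfl, List.getElem_set_self]
  · rw [if_neg hki, List.getElem_set_ne (by omega), add_zero]

lemma bStep_fst (C G H : Int) (st : Int × List Int) (r : Int × Int) :
    (bStep C G H st r).1 = st.1 + gv C G H r 0 := rfl

lemma bStep_len (C G H : Int) (st : Int × List Int) (r : Int × Int) :
    (bStep C G H st r).2.length = st.2.length := by
  unfold bStep
  dsimp only
  split_ifs <;> simp [length_bAddAt]

lemma length_guardAdd (c : Prop) [Decidable c] (d : List Int) (i v : Int) :
    (if c then bAddAt d i v else d).length = d.length := by
  split_ifs <;> simp [length_bAddAt]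

lemma pyGetD_guardAdd (c : Prop) [Decidable c] (d : List Int) (i v k : Int)
    (hc : c → 1 ≤ i ∧ i ≤ 1000) (hlen : d.length = 1001) (hk0 : 0 ≤ k) (hk2 : k ≤ 1000) :
    PySem.List.pyGetD (if c then bAddAt d i v else d) k 0
      = PySem.List.pyGetD d k 0 + if c ∧ k = i then v else 0 := by
  by_cases h1 : c
  · rw [if_pos h1]
    have hi := hc h1
    rw [pyGetD_bAddAt d i v k (by omega) (by omega) hk0 (by omega)]
    congr 1
    by_cases h2 : k = i
    · simp [h1, h2]
    · simp [h2]
  · rw [if_neg h1]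
    have hne : ¬ (c ∧ k = i) := fun h => h1 h.1
    simp [hne]

lemma bStep_get (C G H : Int) (st : Int × List Int) (r : Int × Int)
    (hlen : st.2.length = 1001) (k : Int) (hk1 : 1 ≤ k) (hk2 : k ≤ 1000) :
    PySem.List.pyGetD (bStep C G H st r).2 k 0
      = PySem.List.pyGetD st.2 k 0 + (gv C G H r k - gv C G H r (k - 1)) := by
  unfold bStep
  dsimp only
  by_cases hab : r.1 ≤ r.2
  · rw [if_pos hab]
    rw [pyGetD_guardAdd _ _ _ _ _ (fun h => h)
        (by rw [length_guardAdd]; exact hlen) (by omega) hk2]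
    rw [pyGetD_guardAdd _ _ _ _ _ (fun h => h) hlen (by omega) hk2]
    unfold gv
    split_ifs <;> omega
  · rw [if_neg hab]
    rw [pyGetD_guardAdd _ _ _ _ _ (fun h => h) hlen (by omega) hk2]
    unfold gv
    split_ifs <;> omega

lemma inv_gen (C G H : Int) (tr : List (Int × Int)) :
    ∀ (b : Int) (d : List Int), d.length = 1001 →
      (tr.foldl (bStep C G H) (b, d)).1 = b + (tr.map (fun r => gv C G H r 0)).sum
      ∧ (tr.foldl (bStep C G H) (b, d)).2.length = 1001
      ∧ ∀ k : Int, 1 ≤ k → k ≤ 1000 →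
          PySem.List.pyGetD (tr.foldl (bStep C G H) (b, d)).2 k 0
            = PySem.List.pyGetD d k 0
              + (tr.map (fun r => gv C G H r k - gv C G H r (k - 1))).sum := by
  induction tr with
  | nil => intro b d hd; simp [hd]
  | cons r tl ih =>
    intro b d hd
    simp only [List.foldl_cons, List.map_cons, List.sum_cons]
    have hd' : (bStep C G H (b, d) r).2.length = 1001 := by rw [bStep_len]; exact hd
    obtain ⟨h1, h2, h3⟩ := ih (bStep C G H (b, d) r).1 (bStep C G H (b, d) r).2 hd'
    rw [Prod.mk.eta] at h1 h2 h3
    refine ⟨?_, h2, ?_⟩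
    · rw [h1, bStep_fst]; ring
    · intro k hk1 hk2
      rw [h3 k hk1 hk2, bStep_get C G H (b, d) r hd k hk1 hk2]
      ring

lemma sweep (C G H : Int) (tr : List (Int × Int)) :
    ∀ (n : Nat) (a : Int), 1 ≤ a → a = 1001 - n → ∀ (best : Int),
    ((PySem.List.pyRange a 1001 1).foldl (fun (p : Int × Int) t =>
        let cur := p.1 + (Sv C G H tr t - Sv C G H tr (t - 1))
        (cur, if cur > p.2 then cur else p.2)) (Sv C G H tr (a - 1), best)).2
    = (PySem.List.pyRange a 1001 1).foldl
        (fun mw t => if Sv C G H tr t > mw then Sv C G H tr t else mw) best := by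
  intro n
  induction n with
  | zero =>
    intro a _ ha best
    rw [PySem.List.pyRange_one_eq_nil (by omega)]
    simp
  | succ m ih =>
    intro a ha1 ha best
    by_cases hlt : a < 1001
    · rw [PySem.List.pyRange_one_cons hlt]
      simp only [List.foldl_cons]
      have hcur : Sv C G H tr (a - 1) + (Sv C G H tr a - Sv C G H tr (a - 1))
          = Sv C G H tr a := by ring
      rw [hcur]
      have := ih (a + 1) (by omega) (by omega)
        (if Sv C G H tr a > best then Sv C G H tr a else best)
      simpa using this
    · rw [PySem.List.pyRange_one_eq_nil (by omega)]
      simp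

lemma sum_sub_gv (C G H k : Int) (tr : List (Int × Int)) :
    (tr.map (fun r => gv C G H r k - gv C G H r (k - 1))).sum
      = Sv C G H tr k - Sv C G H tr (k - 1) := by
  unfold Sv
  induction tr with
  | nil => simp
  | cons r tl ih => simp only [List.map_cons, List.sum_cons, ih]; ring

-- ===== VERDICT (by name: the statement is the Claim_ definition above) =====
theorem max_workload_spec : Claim_equal_max_workload := by
  intro N C G H tr _
  unfold Spec_max_workload max_workload max_workload_alt
  dsimp only
  obtain ⟨h1, h2, h3⟩ := inv_gen C G H tr 0 (List.replicate 1001 0) List.length_replicate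
  have hbase : (List.foldl (bStep C G H) ((0 : Int), List.replicate 1001 0) tr).1
      = Sv C G H tr 0 := by rw [h1]; simp [Sv]
  have hfun : ∀ (p : Int × Int), ∀ t ∈ PySem.List.pyRange 1 1001 1,
      ((p.1 + PySem.List.pyGetD (List.foldl (bStep C G H) ((0 : Int), List.replicate 1001 0) tr).2 t 0,
        if p.1 + PySem.List.pyGetD (List.foldl (bStep C G H) ((0 : Int), List.replicate 1001 0) tr).2 t 0 > p.2 then
          p.1 + PySem.List.pyGetD (List.foldl (bStep C G H) ((0 : Int), List.replicate 1001 0) tr).2 t 0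
        else p.2) : Int × Int)
      = (p.1 + (Sv C G H tr t - Sv C G H tr (t - 1)),
        if p.1 + (Sv C G H tr t - Sv C G H tr (t - 1)) > p.2 then
          p.1 + (Sv C G H tr t - Sv C G H tr (t - 1)) else p.2) := by
    intro p t ht
    have hm := PySem.List.mem_pyRange_one.mp ht
    have hget := h3 t (by omega) (by omega)
    have hrep : PySem.List.pyGetD (List.replicate 1001 (0 : Int)) t 0 = 0 := by
      rw [PySem.List.pyGetD_eq_getElem _ _ (by omega) (by simp only [List.length_replicate]; omega)]
      rw [List.getElem_replicate]
    rw [hget, hrep, zero_add, sum_sub_gv C G H t tr]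
  have hB := PySem.List.foldl_congr_mem (PySem.List.pyRange 1 1001 1) _
      (fun (p : Int × Int) t =>
        (p.1 + (Sv C G H tr t - Sv C G H tr (t - 1)),
          if p.1 + (Sv C G H tr t - Sv C G H tr (t - 1)) > p.2 then
            p.1 + (Sv C G H tr t - Sv C G H tr (t - 1)) else p.2))
      ((List.foldl (bStep C G H) ((0 : Int), List.replicate 1001 0) tr).1,
        max 0 (List.foldl (bStep C G H) ((0 : Int), List.replicate 1001 0) tr).1) hfun
  rw [hB, hbase]
  have hsw := sweep C G H tr 1000 1 (by omega) (by norm_num) (max 0 (Sv C G H tr 0))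
  norm_num at hsw
  rw [hsw]
  have hA : ∀ (mw : Int), ∀ t ∈ PySem.List.pyRange 0 1001 1,
      (if (tr.foldl (fun acc r =>
            if t < r.1 then acc + C
            else if r.1 ≤ t ∧ t ≤ r.2 then acc + G else acc + H) 0) > mw then
        (tr.foldl (fun acc r =>
            if t < r.1 then acc + C
            else if r.1 ≤ t ∧ t ≤ r.2 then acc + G else acc + H) 0)
      else mw)
      = (if Sv C G H tr t > mw then Sv C G H tr t else mw) := by
    intro mw t _
    rw [inner_eq_S]
  have hA2 := PySem.List.foldl_congr_mem (PySem.List.pyRange 0 1001 1) _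
      (fun (mw : Int) t => if Sv C G H tr t > mw then Sv C G H tr t else mw) 0 hA
  rw [hA2]
  rw [PySem.List.pyRange_one_cons (by omega : (0 : Int) < 1001)]
  simp only [List.foldl_cons, zero_add]
  have hinit : (if Sv C G H tr 0 > 0 then Sv C G H tr 0 else 0) = max 0 (Sv C G H tr 0) := by
    rcases le_or_gt (Sv C G H tr 0) 0 with h | h
    · rw [if_neg (by omega), max_eq_left h]
    · rw [if_pos h, max_eq_right (by omega)]
  rw [hinit]
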